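-- pv_equiv track=rewrite | github.com/innodoc/innoconv | innoconv/utils.py | parse_nested_args
-- ===== SOURCE A (Python) =====
-- def parse_nested_args(to_parse):
--     r"""
--     Parse LaTeX command arguments that can have nested commands. Returns
--     arguments and rest string.
--
--     Parses strings like: ``{bar}{baz{}}rest`` into
--     ``[['bar', 'baz{}'], 'rest']``.
--
--     :param to_parse: String to parse
--     :type to_parse: str
--
--     :rtype: (list, str)
--     :returns: parsed arguments and rest string
--     """
--     pargs = []
--     if to_parse.startswith('{'):
--         stack = []
--         for i, cha in enumerate(to_parse):
--             if not stack and cha != '{':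
--                 break
--             elif cha == '{':
--                 stack.append(i)
--             elif cha == '}' and stack:
--                 start = stack.pop()
--                 if not stack:
--                     pargs.append(to_parse[start + 1: i])
--         chars_to_remove = len(''.join(pargs)) + 2 * len(pargs)
--         to_parse = to_parse[chars_to_remove:]
--     if not to_parse:
--         to_parse = None
--     return (pargs, to_parse)
-- ===== SOURCE B (Python) =====
-- def _matching(s):
--     """Index of the '}' matching s[0] (assumed '{'), or None if unbalanced."""
--     depth = 0
--     for i, cha in enumerate(s):
--         if cha == '{':
--             depth += 1
--         elif cha == '}':
--             depth -= 1
--             if depth == 0: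
--                 return i
--     return None
--
--
-- def _peel(s):
--     """Recursively peel leading {...} groups; returns (args, rest)."""
--     if not s.startswith('{'):
--         return [], s
--     j = _matching(s)
--     if j is None:
--         return [], s
--     args, rest = _peel(s[j + 1:])
--     return [s[1:j]] + args, rest
--
--
-- def parse_nested_args(to_parse):
--     """Recursive decomposition: peel one balanced group at a time via a
--     matching-brace helper, instead of one accumulating stack scan."""
--     pargs, rest = [], to_parse
--     if to_parse.startswith('{'):
--         pargs, rest = _peel(to_parse)
--     return (pargs, rest if rest else None)
-- ===== Notes on version B (the rewrite author's own statement) =====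
-- stated objective: alternative
-- what changed: Replaces A's single accumulating stack scan plus a post-hoc character-count (joined arg lengths + 2 per arg) by a recursive decomposition: a matching-brace helper finds the close of the leading group, the group is sliced off and the parser recurses on the remainder, the rest string falling out of the recursion.
import Mathlib
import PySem

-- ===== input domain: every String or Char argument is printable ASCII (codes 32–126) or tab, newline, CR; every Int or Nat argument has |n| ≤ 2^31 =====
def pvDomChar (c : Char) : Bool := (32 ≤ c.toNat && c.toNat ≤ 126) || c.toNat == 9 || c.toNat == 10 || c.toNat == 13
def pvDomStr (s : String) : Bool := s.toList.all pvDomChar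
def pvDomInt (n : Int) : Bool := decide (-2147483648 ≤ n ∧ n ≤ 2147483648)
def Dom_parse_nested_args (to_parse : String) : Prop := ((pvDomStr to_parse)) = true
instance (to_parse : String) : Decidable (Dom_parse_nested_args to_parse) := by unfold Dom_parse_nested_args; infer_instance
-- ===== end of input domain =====

-- B replaces A's single accumulating stack scan (with its post-hoc character count from the
-- joined arg lengths) by a recursive decomposition: a matching-brace helper plus a
-- peel-one-group-and-recurse parser (objective: alternative); same return value on every input.

-- ===== PORT A =====
-- `for i, cha in enumerate(to_parse)` with `stack` of indices and `pargs`; `break` = return pargs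
def pvLoopA (s : String) : List Char → Nat → List Nat → List String → List String
  | [], _, _, pargs => pargs
  | cha :: rest, i, stack, pargs =>
    if stack = [] ∧ cha ≠ '{' then pargs
    else if cha = '{' then pvLoopA s rest (i+1) (i :: stack) pargs
    else if cha = '}' then
      match stack with
      | start :: stack' =>
          pvLoopA s rest (i+1) stack'
            (if stack' = [] then pargs ++ [PySem.Str.slice s (some ((start : Int) + 1)) (some (i : Int))] else pargs)
      | [] => pvLoopA s rest (i+1) stack pargs  -- unreachable ('}' with empty stack hits the break branch)
    else pvLoopA s rest (i+1) stack pargs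

def parse_nested_args (to_parse : String) : List String × Option String :=
  if PySem.Str.startswith to_parse "{" then
    let pargs := pvLoopA to_parse to_parse.toList 0 [] []
    let chars_to_remove : Int := PySem.Str.len (PySem.Str.join "" pargs) + 2 * pargs.length
    let rest := PySem.Str.slice to_parse (some chars_to_remove) none
    (pargs, if rest = "" then none else some rest)
  else
    ([], if to_parse = "" then none else some to_parse)

-- ===== PORT B =====
-- `_matching(s)`: depth counter over enumerate(s); returns the index closing s[0], or None
def pvMatching : List Char → Nat → Int → Option Nat
  | [], _, _ => none
  | cha :: rest, i, depth =>
    if cha = '{' then pvMatching rest (i+1) (depth+1)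
    else if cha = '}' then
      (if depth - 1 = 0 then some i else pvMatching rest (i+1) (depth-1))
    else pvMatching rest (i+1) depth

-- termination helper for pvPeel (the recursive call's list is strictly shorter)
lemma pvSliceFrom_length_lt (c : Char) (t : List Char) (j : Nat) :
    (PySem.List.slice (c :: t) (some ((j + 1 : Nat) : Int)) none).length < (c :: t).length := by
  rw [PySem.List.slice_from_natCast]
  simp

-- `_peel(s)`: slice off the leading balanced group, recurse on s[j+1:] (over List Char)
def pvPeel : List Char → List String × List Char
  | [] => ([], [])
  | c :: t =>
    if c = '{' then
      match pvMatching (c :: t) 0 0 with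
      | some j =>
          let res := pvPeel (PySem.List.slice (c :: t) (some ((j + 1 : Nat) : Int)) none)
          (String.ofList (PySem.List.slice (c :: t) (some ((1 : Nat) : Int)) (some ((j : Nat) : Int))) :: res.1, res.2)
      | none => ([], c :: t)
    else ([], c :: t)
termination_by cs => cs.length
decreasing_by exact pvSliceFrom_length_lt _ _ _

def parse_nested_args_alt (to_parse : String) : List String × Option String :=
  if PySem.Str.startswith to_parse "{" then
    let res := pvPeel to_parse.toList
    let rest := String.ofList res.2
    (res.1, if rest = "" then none else some rest)
  else
    ([], if to_parse = "" then none else some to_parse)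

-- ===== PRECONDITION & SPEC =====
def Spec_parse_nested_args (to_parse : String) (out : List String × Option String) : Prop := out = parse_nested_args_alt to_parse
instance (to_parse : String) (out : List String × Option String) : Decidable (Spec_parse_nested_args to_parse out) := by unfold Spec_parse_nested_args; infer_instance

-- ===== CLAIM (what is proved, stated in full; the proofs are below) =====
def Claim_equal_parse_nested_args : Prop := ∀ (to_parse : String), Dom_parse_nested_args to_parse → Spec_parse_nested_args to_parse (parse_nested_args to_parse)

-- ===== LEMMAS AND PROOFS =====

-- one-step unfolding lemmas for the two loops
lemma pvLoopA_break {s : String} {cha : Char} {rest : List Char} {i : Nat} {pargs : List String}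
    (h : cha ≠ '{') : pvLoopA s (cha :: rest) i [] pargs = pargs := by
  simp [pvLoopA, h]

lemma pvLoopA_push (s : String) (rest : List Char) (i : Nat) (stack : List Nat) (pargs : List String) :
    pvLoopA s ('{' :: rest) i stack pargs = pvLoopA s rest (i+1) (i :: stack) pargs := by
  simp [pvLoopA]

lemma pvLoopA_close (s : String) (rest : List Char) (i s0 : Nat) (stack' : List Nat) (pargs : List String) :
    pvLoopA s ('}' :: rest) i (s0 :: stack') pargs = pvLoopA s rest (i+1) stack'
      (if stack' = [] then pargs ++ [PySem.Str.slice s (some ((s0 : Int) + 1)) (some (i : Int))] else pargs) := by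
  simp [pvLoopA]

lemma pvLoopA_other {s : String} {cha : Char} {rest : List Char} {i s0 : Nat} {stack' : List Nat}
    {pargs : List String} (h1 : cha ≠ '{') (h2 : cha ≠ '}') :
    pvLoopA s (cha :: rest) i (s0 :: stack') pargs = pvLoopA s rest (i+1) (s0 :: stack') pargs := by
  simp [pvLoopA, h1, h2]

lemma pvMatching_close (rest : List Char) (i : Nat) (d : Int) :
    pvMatching ('}' :: rest) i d = if d - 1 = 0 then some i else pvMatching rest (i+1) (d-1) := by
  simp [pvMatching]

lemma pvMatching_other {cha : Char} {rest : List Char} {i : Nat} {d : Int}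
    (h1 : cha ≠ '{') (h2 : cha ≠ '}') :
    pvMatching (cha :: rest) i d = pvMatching rest (i+1) d := by
  simp [pvMatching, h1, h2]

lemma pvPeel_nil : pvPeel [] = ([], []) := by rw [pvPeel]

lemma pvPeel_not_brace {c : Char} {t : List Char} (h : c ≠ '{') : pvPeel (c :: t) = ([], c :: t) := by
  rw [pvPeel.eq_def]; simp [h]

lemma pvPeel_none {t : List Char} (hm : pvMatching ('{' :: t) 0 0 = none) :
    pvPeel ('{' :: t) = ([], '{' :: t) := by
  rw [pvPeel.eq_def]; simp [hm]

lemma pvPeel_some {t : List Char} {j : Nat} (hm : pvMatching ('{' :: t) 0 0 = some j) :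
    pvPeel ('{' :: t) =
      (String.ofList (PySem.List.slice ('{' :: t) (some ((1 : Nat) : Int)) (some ((j : Nat) : Int))) ::
        (pvPeel (PySem.List.slice ('{' :: t) (some ((j + 1 : Nat) : Int)) none)).1,
       (pvPeel (PySem.List.slice ('{' :: t) (some ((j + 1 : Nat) : Int)) none)).2) := by
  rw [pvPeel.eq_def]; simp [hm]

/-- A's `chars_to_remove`, as a Nat function of the collected args. -/
def pvWeight (pargs : List String) : Nat :=
  (pargs.map (fun p => p.toList.length)).sum + 2 * pargs.length

lemma pvWeight_cons (p : String) (pargs : List String) :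
    pvWeight (p :: pargs) = p.toList.length + 2 + pvWeight pargs := by
  simp [pvWeight]; ring

lemma join_empty_sep : ∀ (parts : List (List Char)), PySem.Chars.join [] parts = parts.flatten
  | [] => by simp [PySem.Chars.join, List.intercalate]
  | [a] => by simp [PySem.Chars.join, List.intercalate]
  | a :: b :: r => by rw [PySem.Chars.join_cons_cons, join_empty_sep (b :: r)]; simp

lemma len_join_weight (pargs : List String) :
    PySem.Str.len (PySem.Str.join "" pargs) + 2 * pargs.length = (pvWeight pargs : Int) := by
  rw [PySem.Str.len_eq, PySem.Str.toList_join,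
    show ("" : String).toList = [] from rfl, join_empty_sep]
  simp only [pvWeight, List.length_flatten, List.map_map]
  push_cast
  simp [Function.comp_def, String.length_toList]

/-- Shifting the running index of the matcher shifts its answer. -/
lemma pvMatching_shift (r : List Char) : ∀ (n : Nat) (d : Int),
    pvMatching r n d = (pvMatching r 0 d).map (n + ·) := by
  induction r with
  | nil => intro n d; simp [pvMatching]
  | cons c t ih =>
    intro n d
    by_cases h1 : c = '{'
    · simp only [pvMatching, if_pos h1]
      rw [ih (n+1), ih 1]
      cases pvMatching t 0 (d+1) <;> simp <;> omega
    · by_cases h2 : c = '}'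
      · by_cases h3 : d - 1 = 0
        · simp [pvMatching, h2, h3]
        · simp only [pvMatching, if_neg h1, if_pos h2, if_neg h3]
          rw [ih (n+1), ih 1]
          cases pvMatching t 0 (d-1) <;> simp <;> omega
      · simp only [pvMatching, if_neg h1, if_neg h2]
        rw [ih (n+1), ih 1]
        cases pvMatching t 0 d <;> simp <;> omega

lemma pvMatching_lt : ∀ (cs : List Char) (d : Int) (j : Nat),
    pvMatching cs 0 d = some j → j < cs.length := by
  intro cs
  induction cs with
  | nil => intro d j h; simp [pvMatching] at h
  | cons c t ih =>
    intro d j h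
    by_cases h1 : c = '{'
    · rw [pvMatching, if_pos h1, pvMatching_shift] at h
      rcases Option.map_eq_some_iff.mp h with ⟨j', hj', hsum⟩
      have := ih _ _ hj'
      simp only [List.length_cons]; omega
    · by_cases h2 : c = '}'
      · by_cases h3 : d - 1 = 0
        · rw [pvMatching, if_neg h1, if_pos h2, if_pos h3] at h
          simp at h; simp [← h]
        · rw [pvMatching, if_neg h1, if_pos h2, if_neg h3, pvMatching_shift] at h
          rcases Option.map_eq_some_iff.mp h with ⟨j', hj', hsum⟩
          have := ih _ _ hj'
          simp only [List.length_cons]; omega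
      · rw [pvMatching, if_neg h1, if_neg h2, pvMatching_shift] at h
        rcases Option.map_eq_some_iff.mp h with ⟨j', hj', hsum⟩
        have := ih _ _ hj'
        simp only [List.length_cons]; omega

lemma pvMatching_cons_brace (t : List Char) (d : Int) :
    pvMatching ('{' :: t) 0 d = (pvMatching t 0 (d+1)).map (1 + ·) := by
  rw [pvMatching, if_pos rfl, pvMatching_shift]

/-- The rest returned by pvPeel is the input with the args' weight dropped. -/
lemma peel_rest : ∀ (n : Nat) (cs : List Char), cs.length ≤ n →
    (pvPeel cs).2 = cs.drop (pvWeight (pvPeel cs).1) := by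
  intro n
  induction n with
  | zero =>
    intro cs h
    have : cs = [] := List.eq_nil_of_length_eq_zero (by omega)
    subst this; simp [pvPeel_nil, pvWeight]
  | succ n ih =>
    intro cs hlen
    match cs with
    | [] => simp [pvPeel_nil, pvWeight]
    | c :: t =>
      by_cases h1 : c = '{'
      · subst h1
        rcases hm : pvMatching ('{' :: t) 0 0 with _ | j
        · simp [pvPeel_none hm, pvWeight]
        · have hj1 : 1 ≤ j := by
            rw [pvMatching_cons_brace] at hm
            rcases Option.map_eq_some_iff.mp hm with ⟨j', _, hsum⟩
            omega
          have hjlt : j < t.length + 1 := by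
            have := pvMatching_lt _ _ _ hm; simpa using this
          rw [pvPeel_some hm]
          simp only
          rw [pvWeight_cons]
          rw [PySem.List.slice_from_natCast, PySem.List.slice_natCast]
          have harg : (((('{' :: t).drop 1).take (j - 1))).length = j - 1 := by
            simp only [List.length_take, List.length_drop, List.length_cons]
            omega
          rw [String.toList_ofList, harg]
          have hrec := ih (('{' :: t).drop (j+1)) (by simp at hlen ⊢; omega)
          rw [hrec, List.drop_drop]
          congr 1
          omega
      · simp [pvPeel_not_brace h1, pvWeight]

/-- A's loop with a nonempty stack scans to the brace matching the bottom of the stack. -/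
lemma loopA_matching (s : String) : ∀ (cs : List Char) (i : Nat) (stack : List Nat)
    (pargs : List String) (start : Nat),
    cs = s.toList.drop i →
    stack ≠ [] →
    stack.getLast? = some start →
    (∀ st ∈ stack, st < i) →
    pvLoopA s cs i stack pargs =
      match pvMatching cs 0 (stack.length : Int) with
      | some j => pvLoopA s (cs.drop (j+1)) (i+j+1) []
          (pargs ++ [PySem.Str.slice s (some ((start : Int) + 1)) (some ((i+j : Nat) : Int))])
      | none => pargs := by
  intro cs
  induction cs with
  | nil =>
    intro i stack pargs start _ _ _ _
    simp [pvLoopA, pvMatching]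
  | cons cha rest ih =>
    intro i stack pargs start hcs hne hlast hlt
    have hrest : rest = s.toList.drop (i+1) := by
      have := congrArg List.tail hcs
      simpa [List.tail_drop] using this
    obtain ⟨s0, st', rfl⟩ := List.exists_cons_of_ne_nil hne
    by_cases h1 : cha = '{'
    · subst h1
      rw [pvLoopA_push, pvMatching_cons_brace]
      have H := ih (i+1) (i :: s0 :: st') pargs start hrest (by simp)
        (by rw [List.getLast?_cons_cons]; exact hlast)
        (by
          intro x hx
          rcases List.mem_cons.mp hx with h | h
          · omega
          · exact Nat.lt_succ_of_lt (hlt _ h))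
      rw [H]
      rw [show (((i :: s0 :: st').length : Nat) : Int) = ((s0 :: st').length : Int) + 1 from by
        push_cast [List.length_cons]; ring]
      rcases hm : pvMatching rest 0 (((s0 :: st').length : Int) + 1) with _ | j'
      · simp
      · simp only [Option.map_some]
        rw [show ('{' :: rest).drop (1 + j' + 1) = rest.drop (j' + 1) from by
          rw [show 1 + j' + 1 = (j' + 1) + 1 from by omega]; simp]
        rw [show i + (1 + j') + 1 = i + 1 + j' + 1 from by omega]
        rw [show (i + (1 + j') : Nat) = (i + 1 + j' : Nat) from by omega]
    · by_cases h2 : cha = '}'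
      · subst h2
        cases st' with
        | nil =>
          have hs0 : s0 = start := by simpa using hlast
          subst hs0
          have hm : pvMatching ('}' :: rest) 0 ((([s0] : List Nat).length : Int)) = some 0 := by
            simp [pvMatching]
          rw [hm]
          simp only
          rw [pvLoopA_close, if_pos rfl]
          simp
        | cons s1 st'' =>
          have hdep : ¬ (((s0 :: s1 :: st'').length : Int) - 1 = 0) := by
            push_cast [List.length_cons]; omega
          rw [pvMatching_close, if_neg hdep, pvMatching_shift]
          have hlast' : (s1 :: st'').getLast? = some start := by
            rw [← List.getLast?_cons_cons (a := s0)]; exact hlast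
          have H := ih (i+1) (s1 :: st'') pargs start hrest (by simp) hlast'
            (by intro x hx; exact Nat.lt_succ_of_lt (hlt _ (by simp [hx])))
          rw [pvLoopA_close, if_neg (List.cons_ne_nil s1 st''), H]
          rw [show ((s0 :: s1 :: st'').length : Int) - 1 = ((s1 :: st'').length : Int) from by
            push_cast [List.length_cons]; ring]
          rcases hm : pvMatching rest 0 (((s1 :: st'').length : Int)) with _ | j'
          · simp
          · simp only [Option.map_some]
            rw [show ('}' :: rest).drop (1 + j' + 1) = rest.drop (j' + 1) from by
              rw [show 1 + j' + 1 = (j' + 1) + 1 from by omega]; simp]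
            rw [show i + (1 + j') + 1 = i + 1 + j' + 1 from by omega]
            rw [show (i + (1 + j') : Nat) = (i + 1 + j' : Nat) from by omega]
      · -- ordinary character at positive depth
        rw [pvMatching_other h1 h2, pvMatching_shift]
        have H := ih (i+1) (s0 :: st') pargs start hrest (by simp) hlast
          (by intro x hx; exact Nat.lt_succ_of_lt (hlt _ hx))
        rw [pvLoopA_other h1 h2, H]
        rcases hm : pvMatching rest 0 (((s0 :: st').length : Int)) with _ | j'
        · simp
        · simp only [Option.map_some]
          rw [show (cha :: rest).drop (1 + j' + 1) = rest.drop (j' + 1) from by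
            rw [show 1 + j' + 1 = (j' + 1) + 1 from by omega]; simp]
          rw [show i + (1 + j') + 1 = i + 1 + j' + 1 from by omega]
          rw [show (i + (1 + j') : Nat) = (i + 1 + j' : Nat) from by omega]

/-- A's loop at depth 0 collects exactly the args pvPeel peels off. -/
lemma loopA_peel (s : String) : ∀ (n : Nat) (cs : List Char) (i : Nat) (pargs : List String),
    cs.length ≤ n → cs = s.toList.drop i →
    pvLoopA s cs i [] pargs = pargs ++ (pvPeel cs).1 := by
  intro n
  induction n with
  | zero =>
    intro cs i pargs h _
    have : cs = [] := List.eq_nil_of_length_eq_zero (by omega)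
    subst this; simp [pvLoopA, pvPeel_nil]
  | succ n ih =>
    intro cs i pargs hlen hcs
    match cs with
    | [] => simp [pvLoopA, pvPeel_nil]
    | c :: t =>
      have hrest : t = s.toList.drop (i+1) := by
        have := congrArg List.tail hcs
        simpa [List.tail_drop] using this
      by_cases h1 : c = '{'
      · subst h1
        have hm0 := pvMatching_cons_brace t 0
        rw [show (0 : Int) + 1 = 1 from by norm_num] at hm0
        rw [pvLoopA_push,
          loopA_matching s t (i+1) [i] pargs i hrest (by simp) (by simp)
            (by intro x hx; simp at hx; omega)]
        rw [show (([i] : List Nat).length : Int) = 1 from by simp]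
        rcases hm : pvMatching t 0 1 with _ | j'
        · simp only [hm, Option.map_none] at hm0
          show pargs = pargs ++ (pvPeel ('{' :: t)).1
          rw [pvPeel_none hm0]
          simp
        · simp only [hm, Option.map_some] at hm0
          show pvLoopA s (t.drop (j'+1)) (i+1+j'+1) []
              (pargs ++ [PySem.Str.slice s (some ((i : Int) + 1)) (some ((i + 1 + j' : Nat) : Int))]) =
            pargs ++ (pvPeel ('{' :: t)).1
          rw [pvPeel_some hm0]
          simp only
          -- the peeled first argument equals A's slice
          have hslice : PySem.Str.slice s (some ((i : Int) + 1)) (some ((i + 1 + j' : Nat) : Int)) =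
              String.ofList (PySem.List.slice ('{' :: t) (some ((1 : Nat) : Int)) (some ((1 + j' : Nat) : Int))) := by
            apply String.toList_inj.mp
            rw [String.toList_ofList, PySem.Str.toList_slice]
            rw [show ((i : Int) + 1) = ((i + 1 : Nat) : Int) from by push_cast; ring]
            simp only [PySem.Chars.slice_eq_listSlice]
            rw [PySem.List.slice_natCast, PySem.List.slice_natCast]
            rw [show ('{' :: t).drop 1 = t from rfl, hrest]
            rw [show i + 1 + j' - (i + 1) = j' from by omega, show 1 + j' - 1 = j' from by omega]
          have hrec := ih (t.drop (j'+1)) (i + 1 + (j' + 1))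
            (pargs ++ [PySem.Str.slice s (some ((i : Int) + 1)) (some ((i + 1 + j' : Nat) : Int))])
            (by simp at hlen ⊢; omega)
            (by rw [hrest, List.drop_drop])
          rw [PySem.List.slice_from_natCast,
            show ('{' :: t).drop (1 + j' + 1) = t.drop (1 + j') from by
              rw [show 1 + j' + 1 = (1 + j') + 1 from rfl]; simp,
            show 1 + j' = j' + 1 from by omega]
          rw [show i + 1 + j' + 1 = i + 1 + (j' + 1) from by omega, hrec, hslice]
          simp
          rw [show (1 + (j' : Int)) = ((j' : Int) + 1) from by ring]
      · rw [pvLoopA_break h1, pvPeel_not_brace h1]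
        simp

-- ===== VERDICT (by name: the statement is the Claim_ definition above) =====
theorem parse_nested_args_spec : Claim_equal_parse_nested_args := by
  intro s _
  unfold Spec_parse_nested_args parse_nested_args parse_nested_args_alt
  by_cases h : PySem.Str.startswith s "{"
  · rw [if_pos h, if_pos h]
    simp only
    have hargs : pvLoopA s s.toList 0 [] [] = (pvPeel s.toList).1 := by
      simpa using loopA_peel s s.toList.length s.toList 0 [] le_rfl (by simp)
    rw [hargs]
    have hrest : PySem.Str.slice s
        (some (PySem.Str.len (PySem.Str.join "" (pvPeel s.toList).1) +
          2 * ((pvPeel s.toList).1.length : Int))) none = String.ofList (pvPeel s.toList).2 := by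
      apply String.toList_inj.mp
      rw [String.toList_ofList, PySem.Str.toList_slice, len_join_weight]
      simp only [PySem.Chars.slice_eq_listSlice]
      rw [PySem.List.slice_from_natCast]
      rw [peel_rest s.toList.length s.toList le_rfl]
    rw [hrest]
  · rw [if_neg h, if_neg h]
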